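-- pv_equiv track=rewrite | github.com/stevenorum/sunyata | sunyata/canonicalize.py | canonical_resource_name
-- ===== SOURCE A (Python) =====
-- import string
--
-- def _strip(s):
--     new_s = ""
--     for c in s:
--         if c in string.ascii_letters:
--             new_s += c
--     return new_s
--
-- def canonical_resource_name(path):
--     # Remove the forward slashes but have every character following one be capitalized.
--     # prepend root
--     path = path if path else "/"
--     path = path.lower()
--     path = path[:-1] if path[-1] == "/" else path
--     path = path if not path or path[0] == "/" else "/" + path
--     for c in string.ascii_lowercase:
--         path = path.replace("/" + c, c.upper())
--     if not path:
--         return "rootResource"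
--     return _strip(path) + "Resource"
-- ===== SOURCE B (Python) =====
-- def canonical_resource_name(path):
--     if not path:
--         return "rootResource"
--     p = path.lower()
--     if p == "/":
--         return "rootResource"
--     if p.endswith("/"):
--         p = p[:-1]
--     parts = []
--     for seg in p.split("/"):
--         if seg and 'a' <= seg[0] <= 'z':
--             seg = seg[0].upper() + seg[1:]
--         parts.append(''.join(ch for ch in seg if ch.isalpha()))
--     return ''.join(parts) + "Resource"
-- ===== Notes on version B (the rewrite author's own statement) =====
-- stated objective: simpler
-- what changed: Replaces A's 26 sequential whole-string str.replace passes (one per lowercase letter) plus a char-by-char strip with a single split on '/' and one independent per-segment transform (capitalize first char if lowercase, keep letters).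
import Mathlib
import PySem

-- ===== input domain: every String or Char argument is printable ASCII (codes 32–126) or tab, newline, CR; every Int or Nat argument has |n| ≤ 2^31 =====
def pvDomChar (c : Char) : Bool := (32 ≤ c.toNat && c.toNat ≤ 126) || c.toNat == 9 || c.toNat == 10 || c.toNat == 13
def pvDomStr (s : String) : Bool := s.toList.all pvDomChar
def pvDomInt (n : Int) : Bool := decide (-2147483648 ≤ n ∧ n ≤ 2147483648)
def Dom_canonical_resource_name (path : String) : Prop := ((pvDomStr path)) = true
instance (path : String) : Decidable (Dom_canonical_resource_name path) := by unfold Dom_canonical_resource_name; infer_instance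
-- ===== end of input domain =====

set_option maxRecDepth 8000


-- B replaces A's 26 sequential whole-string replace passes by one split on '/' with an
-- independent per-segment transform; equality of the return values is proved for all inputs.

-- ===== PORT A =====
-- string.ascii_letters
def pvAsciiLetters : String := "abcdefghijklmnopqrstuvwxyzABCDEFGHIJKLMNOPQRSTUVWXYZ"

-- _strip: for c in s: if c in string.ascii_letters: new_s += c
def pv_strip (s : String) : String :=
  s.toList.foldl (fun acc c => if PySem.Str.isIn (String.ofList [c]) pvAsciiLetters then acc ++ String.ofList [c] else acc) ""

def canonical_resource_name (path : String) : String :=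
  -- path = path if path else "/"
  let p0 := if path = "" then "/" else path
  -- path = path.lower()
  let p1 := PySem.Str.lower p0
  -- path = path[:-1] if path[-1] == "/" else path
  let p2 := if PySem.Str.pyGet? p1 (-1) = some '/' then PySem.Str.slice p1 none (some (-1)) else p1
  -- path = path if not path or path[0] == "/" else "/" + path
  let p3 := if p2 = "" ∨ PySem.Str.pyGet? p2 0 = some '/' then p2 else "/" ++ p2
  -- for c in string.ascii_lowercase: path = path.replace("/" + c, c.upper())
  let p4 := "abcdefghijklmnopqrstuvwxyz".toList.foldl
      (fun p c => PySem.Str.replace p (String.ofList ['/', c]) (PySem.Str.upper (String.ofList [c]))) p3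
  if p4 = "" then "rootResource" else pv_strip p4 ++ "Resource"

-- ===== PORT B =====
def canonical_resource_name_alt (path : String) : String :=
  if path = "" then "rootResource"
  else
    let p := PySem.Str.lower path
    if p = "/" then "rootResource"
    else
      let p' := if PySem.Str.endswith p "/" then PySem.Str.slice p none (some (-1)) else p
      let segs := PySem.Chars.splitOn p'.toList ['/']
      let parts := segs.map (fun seg =>
        (match seg with
         | c :: rest => if PySem.Chars.islower c then PySem.Chars.upperChar c :: rest else c :: rest
         | [] => ([] : List Char)).filter PySem.Chars.isalpha)
      String.ofList (parts.flatten ++ "Resource".toList)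

-- ===== PRECONDITION & SPEC =====
def Spec_canonical_resource_name (path : String) (out : String) : Prop := out = canonical_resource_name_alt path
instance (path : String) (out : String) : Decidable (Spec_canonical_resource_name path out) := by unfold Spec_canonical_resource_name; infer_instance

-- ===== CLAIM (what is proved, stated in full; the proofs are below) =====
def Claim_equal_canonical_resource_name : Prop := ∀ (path : String), Dom_canonical_resource_name path → Spec_canonical_resource_name path (canonical_resource_name path)

-- ===== LEMMAS AND PROOFS =====

theorem pv_char_le_iff (a b : Char) : (a ≤ b) ↔ a.toNat ≤ b.toNat := Iff.rfl

theorem pv_islower_iff (c : Char) : PySem.Chars.islower c = true ↔ 97 ≤ c.toNat ∧ c.toNat ≤ 122 := by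
  simp [PySem.Chars.islower, pv_char_le_iff]

theorem pv_isupper_iff (c : Char) : PySem.Chars.isupper c = true ↔ 65 ≤ c.toNat ∧ c.toNat ≤ 90 := by
  simp [PySem.Chars.isupper, pv_char_le_iff]

theorem pv_toNat_upperChar (c : Char) (h : PySem.Chars.islower c = true) :
    (PySem.Chars.upperChar c).toNat = c.toNat - 32 := by
  rw [pv_islower_iff] at h
  rw [PySem.Chars.upperChar, if_pos (by rw [pv_islower_iff]; exact h), Char.toNat_ofNat,
    if_pos (Or.inl (by omega))]

theorem pv_islower_upperChar (c : Char) : PySem.Chars.islower (PySem.Chars.upperChar c) = false := by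
  by_cases h : PySem.Chars.islower c = true
  · have := pv_toNat_upperChar c h
    rw [pv_islower_iff] at h
    rw [Bool.eq_false_iff]
    intro hl
    rw [pv_islower_iff, this] at hl
    omega
  · rw [PySem.Chars.upperChar, if_neg h]
    simpa using h

def pvRepc (c : Char) : List Char → List Char
  | [] => []
  | [x] => [x]
  | x :: y :: t =>
    if x = '/' ∧ y = c then PySem.Chars.upperChar c :: pvRepc c t
    else x :: pvRepc c (y :: t)

theorem pv_go (c : Char) : ∀ (fuel : Nat) (l acc : List Char), l.length ≤ fuel →
    PySem.Chars.replace.go ['/', c] [PySem.Chars.upperChar c] fuel l acc = acc.reverse ++ pvRepc c l := by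
  intro fuel
  induction fuel with
  | zero =>
    intro l acc h
    have : l = [] := by cases l <;> simp_all
    subst this
    simp [PySem.Chars.replace.go, pvRepc]
  | succ n ih =>
    intro l acc h
    match l with
    | [] => simp [PySem.Chars.replace.go, pvRepc]
    | [x] =>
      have hpf : List.isPrefixOf ['/', c] [x] = false := by
        simp [List.isPrefixOf]
      simp only [PySem.Chars.replace.go, hpf]
      rw [ih [] (x :: acc) (by simp)]
      simp [pvRepc]
    | x :: y :: t =>
      by_cases hc : x = '/' ∧ y = c
      · have hpf : List.isPrefixOf ['/', c] (x :: y :: t) = true := by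
          simp [List.isPrefixOf, hc.1, hc.2]
        simp only [PySem.Chars.replace.go, hpf, if_true]
        rw [show List.drop (['/', c].length) (x :: y :: t) = t from rfl, ih t _ (by simp at h ⊢; omega)]
        simp [pvRepc, hc]
      · have hpf : List.isPrefixOf ['/', c] (x :: y :: t) = false := by
          rcases (not_and_or.mp hc) with h1 | h2
          · simp [List.isPrefixOf]; intro he; exact absurd he.symm h1
          · simp [List.isPrefixOf]; intro _ he; exact absurd he.symm h2
        simp only [PySem.Chars.replace.go, hpf]
        rw [ih (y :: t) _ (by simp at h ⊢; omega)]
        simp [pvRepc, hc]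

theorem pv_replace_eq_repc (c : Char) (l : List Char) :
    PySem.Chars.replace l ['/', c] [PySem.Chars.upperChar c] = pvRepc c l := by
  have := pv_go c l.length l [] (le_refl _)
  simpa [PySem.Chars.replace] using this

def pvCap : List Char → List Char
  | [] => []
  | [x] => [x]
  | x :: y :: t =>
    if x = '/' ∧ PySem.Chars.islower y then PySem.Chars.upperChar y :: pvCap t
    else x :: pvCap (y :: t)

def pvLetters : List Char := "abcdefghijklmnopqrstuvwxyz".toList

def pvStep (s : List Char) (c : Char) : List Char := pvRepc c s

-- repc on a non-slash head
theorem pvRepc_cons_ne (c x : Char) (t : List Char) (hx : x ≠ '/') :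
    pvRepc c (x :: t) = x :: pvRepc c t := by
  cases t with
  | nil => simp [pvRepc]
  | cons y t2 => simp [pvRepc, hx]

theorem pv_fold_cons_ne (x : Char) (hx : x ≠ '/') : ∀ (L : List Char) (t : List Char),
    L.foldl pvStep (x :: t) = x :: L.foldl pvStep t := by
  intro L
  induction L with
  | nil => intro t; simp
  | cons c L ih =>
    intro t
    simp only [List.foldl_cons]
    rw [show pvStep (x :: t) c = x :: pvStep t c from pvRepc_cons_ne c x t hx, ih]

def pvHNL (l : List Char) : Prop :=
  match l with
  | [] => True
  | y :: _ => PySem.Chars.islower y = false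

theorem pvHNL_repc (c : Char) (l : List Char) (h : pvHNL l) : pvHNL (pvRepc c l) := by
  match l with
  | [] => simpa [pvRepc]
  | [x] => simpa [pvRepc]
  | x :: y :: t =>
    by_cases hc : x = '/' ∧ y = c
    · simp only [pvRepc, if_pos hc, pvHNL]
      exact pv_islower_upperChar c
    · simp only [pvRepc, if_neg hc]
      exact h

theorem pv_fold_slash (t : List Char) (ht : pvHNL t)
    (L : List Char) (hL : ∀ c ∈ L, PySem.Chars.islower c = true) :
    L.foldl pvStep ('/' :: t) = '/' :: L.foldl pvStep t := by
  induction L generalizing t with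
  | nil => simp
  | cons c L ih =>
    simp only [List.foldl_cons]
    have hstep : pvStep ('/' :: t) c = '/' :: pvStep t c := by
      match t with
      | [] => simp [pvStep, pvRepc]
      | y :: t2 =>
        have hcl : PySem.Chars.islower c = true := hL c (by simp)
        have hy : y ≠ c := by
          intro he
          have hyl : PySem.Chars.islower y = false := ht
          rw [he, hcl] at hyl
          simp at hyl
        show pvRepc c ('/' :: y :: t2) = '/' :: pvRepc c (y :: t2)
        conv_lhs => rw [pvRepc]
        rw [if_neg (by simp [hy])]
    rw [hstep, ih (pvStep t c) (pvHNL_repc c t ht) (fun d hd => hL d (by simp [hd]))]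

theorem pv_islower_ne_slash (c : Char) (h : PySem.Chars.islower c = true) : c ≠ '/' := by
  intro he; rw [he] at h; simp [pv_islower_iff] at h

theorem pv_upperChar_ne_slash (c : Char) (h : PySem.Chars.islower c = true) :
    PySem.Chars.upperChar c ≠ '/' := by
  have ht := pv_toNat_upperChar c h
  rw [pv_islower_iff] at h
  intro he
  rw [he] at ht
  have h47 : ('/' : Char).toNat = 47 := rfl
  omega

theorem pv_fold_nil (L : List Char) : L.foldl pvStep [] = [] := by
  induction L with
  | nil => rfl
  | cons c L ih => simpa [pvStep, pvRepc] using ih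

theorem pv_fold_single (L : List Char) (x : Char) : L.foldl pvStep [x] = [x] := by
  induction L with
  | nil => rfl
  | cons c L ih => simpa [pvStep, pvRepc] using ih

theorem pvCap_cons_ne (x : Char) (t : List Char) (hx : x ≠ '/') :
    pvCap (x :: t) = x :: pvCap t := by
  cases t with
  | nil => simp [pvCap]
  | cons y t2 => simp [pvCap, hx]

theorem pv_fold_skip (c0 : Char) (h0 : PySem.Chars.islower c0 = true) :
    ∀ (L t : List Char), c0 ∉ L → L.foldl pvStep ('/' :: c0 :: t) = '/' :: c0 :: L.foldl pvStep t := by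
  intro L
  induction L with
  | nil => intro t _; simp
  | cons c L ih =>
    intro t hm
    have hcne : c0 ≠ c := by intro he; rw [he] at hm; simp at hm
    simp only [List.foldl_cons]
    have hstep : pvStep ('/' :: c0 :: t) c = '/' :: c0 :: pvStep t c := by
      show pvRepc c ('/' :: c0 :: t) = '/' :: c0 :: pvRepc c t
      conv_lhs => rw [pvRepc]
      rw [if_neg (by simp; intro h; exact hcne h)]
      rw [pvRepc_cons_ne c c0 t (pv_islower_ne_slash c0 h0)]
    have hm' : c0 ∉ L := fun h => hm (List.mem_cons_of_mem c h)
    rw [hstep]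
    exact ih (pvStep t c) hm'

def pvLettersL : List Char := ['a','b','c','d','e','f','g','h','i','j','k','l','m','n','o','p','q','r','s','t','u','v','w','x','y','z']

theorem pv_letters_eq : pvLetters = pvLettersL := by rfl

theorem pv_letters_lower : ∀ c ∈ pvLetters, PySem.Chars.islower c = true := by
  have h : pvLettersL.all PySem.Chars.islower = true := by decide
  rw [pv_letters_eq]
  simpa [List.all_eq_true] using h

theorem pv_letters_nodup : pvLetters.Nodup := by
  rw [pv_letters_eq]; decide

theorem pv_mem_letters (c : Char) (h : PySem.Chars.islower c = true) : c ∈ pvLetters := by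
  have he : pvLetters = List.map Char.ofNat (List.range' 97 26) := by rw [pv_letters_eq]; decide
  rw [pv_islower_iff] at h
  rw [he, List.mem_map]
  exact ⟨c.toNat, by rw [List.mem_range'_1]; omega, Char.ofNat_toNat c⟩

theorem pv_fold_eq_cap_aux : ∀ (n : Nat) (l : List Char), l.length ≤ n →
    pvLetters.foldl pvStep l = pvCap l := by
  intro n
  induction n with
  | zero =>
    intro l h
    have : l = [] := by cases l <;> simp_all
    subst this
    simp [pv_fold_nil, pvCap]
  | succ n ih =>
    intro l hlen
    match l with
    | [] => simp [pv_fold_nil, pvCap]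
    | [x] => simp [pv_fold_single, pvCap]
    | x :: y :: t =>
      by_cases hx : x = '/'
      · subst hx
        by_cases hy : PySem.Chars.islower y = true
        · obtain ⟨L1, L2, hsplit⟩ := List.append_of_mem (pv_mem_letters y hy)
          have hnd : (L1 ++ y :: L2).Nodup := by rw [← hsplit]; exact pv_letters_nodup
          have hy1 : y ∉ L1 := by
            rw [List.nodup_append] at hnd
            exact fun hm => (hnd.2.2 y hm y (by simp)) rfl
          have key : pvLetters.foldl pvStep ('/' :: y :: t) =
              PySem.Chars.upperChar y :: pvLetters.foldl pvStep t := by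
            conv_lhs => rw [hsplit]
            rw [List.foldl_append, pv_fold_skip y hy L1 t hy1, List.foldl_cons]
            have hstep : pvStep ('/' :: y :: L1.foldl pvStep t) y =
                PySem.Chars.upperChar y :: pvRepc y (L1.foldl pvStep t) := by
              show pvRepc y ('/' :: y :: _) = _
              conv_lhs => rw [pvRepc]
              rw [if_pos ⟨rfl, rfl⟩]
            rw [hstep, pv_fold_cons_ne _ (pv_upperChar_ne_slash y hy) L2]
            rw [hsplit, List.foldl_append, List.foldl_cons]
            rfl
          rw [key, ih t (by simp at hlen; omega)]
          have : pvCap ('/' :: y :: t) = PySem.Chars.upperChar y :: pvCap t := by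
            rw [pvCap]
            rw [if_pos ⟨rfl, hy⟩]
          rw [this]
        · rw [pv_fold_slash (y :: t) (by simpa [pvHNL] using hy) pvLetters pv_letters_lower]
          rw [ih (y :: t) (by simp at hlen ⊢; omega)]
          rw [pvCap, if_neg (by simp [hy])]
      · rw [pv_fold_cons_ne x hx pvLetters (y :: t), ih (y :: t) (by simp at hlen ⊢; omega),
          pvCap_cons_ne x (y :: t) hx]

theorem pv_fold_eq_cap (l : List Char) : pvLetters.foldl pvStep l = pvCap l :=
  pv_fold_eq_cap_aux l.length l (le_refl _)

def pvSplitc : List Char → List (List Char)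
  | [] => [[]]
  | c :: t =>
    if c = '/' then [] :: pvSplitc t
    else match pvSplitc t with
      | s :: r => (c :: s) :: r
      | [] => [[c]]

theorem pvSplitc_ne_nil (l : List Char) : pvSplitc l ≠ [] := by
  match l with
  | [] => simp [pvSplitc]
  | c :: t =>
    rw [pvSplitc]
    split
    · simp
    · split <;> simp

def pvConsFirst (x : List Char) : List (List Char) → List (List Char)
  | s :: r => (x ++ s) :: r
  | [] => [x]

theorem pv_split_go (fuel : Nat) : ∀ (l cur : List Char) (acc : List (List Char)), l.length ≤ fuel →
    PySem.Chars.splitOn.go ['/'] fuel l cur acc =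
      acc.reverse ++ pvConsFirst cur.reverse (pvSplitc l) := by
  induction fuel with
  | zero =>
    intro l cur acc h
    have : l = [] := by cases l <;> simp_all
    subst this
    simp [PySem.Chars.splitOn.go, pvSplitc, pvConsFirst]
  | succ n ih =>
    intro l cur acc h
    match l with
    | [] => simp [PySem.Chars.splitOn.go, pvSplitc, pvConsFirst]
    | c :: t =>
      by_cases hc : c = '/'
      · have hpf : List.isPrefixOf ['/'] (c :: t) = true := by simp [List.isPrefixOf, hc]
        simp only [PySem.Chars.splitOn.go, hpf, if_true]
        rw [show List.drop (['/'].length) (c :: t) = t from rfl]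
        rw [ih t [] (cur.reverse :: acc) (by simp at h ⊢; omega)]
        rw [pvSplitc, if_pos hc]
        cases hs : pvSplitc t with
        | nil => exact absurd hs (pvSplitc_ne_nil t)
        | cons s r => simp [pvConsFirst]
      · have hpf : List.isPrefixOf ['/'] (c :: t) = false := by
          simp [List.isPrefixOf]; exact fun he => hc he.symm
        simp only [PySem.Chars.splitOn.go, hpf]
        rw [ih t (c :: cur) acc (by simp at h ⊢; omega)]
        rw [pvSplitc, if_neg hc]
        cases hs : pvSplitc t with
        | nil => exact absurd hs (pvSplitc_ne_nil t)
        | cons s r => simp [pvConsFirst]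

theorem pv_splitOn_eq_splitc (l : List Char) :
    PySem.Chars.splitOn l ['/'] = pvSplitc l := by
  rw [PySem.Chars.splitOn, pv_split_go (l.length + 1) l [] [] (by omega)]
  cases hs : pvSplitc l with
  | nil => exact absurd hs (pvSplitc_ne_nil l)
  | cons s r => simp [pvConsFirst]

def pvUppersL : List Char := ['A','B','C','D','E','F','G','H','I','J','K','L','M','N','O','P','Q','R','S','T','U','V','W','X','Y','Z']

theorem pv_ascii_eq : pvAsciiLetters.toList = pvLettersL ++ pvUppersL := by rfl

theorem pv_mem_lettersL_iff (c : Char) : c ∈ pvLettersL ↔ PySem.Chars.islower c = true := by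
  have he : pvLettersL = List.map Char.ofNat (List.range' 97 26) := by decide
  rw [he, List.mem_map]
  constructor
  · rintro ⟨n, hn, rfl⟩
    rw [List.mem_range'_1] at hn
    rw [pv_islower_iff, Char.toNat_ofNat, if_pos (Or.inl (by omega))]
    omega
  · intro h
    rw [pv_islower_iff] at h
    exact ⟨c.toNat, by rw [List.mem_range'_1]; omega, Char.ofNat_toNat c⟩

theorem pv_mem_uppersL_iff (c : Char) : c ∈ pvUppersL ↔ PySem.Chars.isupper c = true := by
  have he : pvUppersL = List.map Char.ofNat (List.range' 65 26) := by decide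
  rw [he, List.mem_map]
  constructor
  · rintro ⟨n, hn, rfl⟩
    rw [List.mem_range'_1] at hn
    rw [pv_isupper_iff, Char.toNat_ofNat, if_pos (Or.inl (by omega))]
    omega
  · intro h
    rw [pv_isupper_iff] at h
    exact ⟨c.toNat, by rw [List.mem_range'_1]; omega, Char.ofNat_toNat c⟩

theorem pv_singleton_infix_iff (c : Char) (l : List Char) : [c] <:+: l ↔ c ∈ l := by
  constructor
  · intro h
    exact List.singleton_sublist.mp h.sublist
  · intro h
    obtain ⟨s, t, rfl⟩ := List.append_of_mem h
    exact ⟨s, t, by simp⟩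

theorem pv_isIn_ascii (c : Char) :
    PySem.Str.isIn (String.ofList [c]) pvAsciiLetters = PySem.Chars.isalpha c := by
  rw [PySem.Str.isIn_eq]
  by_cases h : PySem.Chars.isalpha c = true
  · rw [h, PySem.Chars.isIn_iff_infix]
    rw [String.toList_ofList, pv_ascii_eq, pv_singleton_infix_iff]
    rw [PySem.Chars.isalpha, Bool.or_eq_true] at h
    rcases h with h | h
    · exact List.mem_append_right _ ((pv_mem_uppersL_iff c).mpr h)
    · exact List.mem_append_left _ ((pv_mem_lettersL_iff c).mpr h)
  · rw [Bool.not_eq_true] at h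
    rw [h, PySem.Chars.isIn_eq_false_iff]
    rw [String.toList_ofList, pv_ascii_eq, pv_singleton_infix_iff]
    intro hm
    rcases List.mem_append.mp hm with hm | hm
    · rw [pv_mem_lettersL_iff] at hm
      simp [PySem.Chars.isalpha, hm] at h
    · rw [pv_mem_uppersL_iff] at hm
      simp [PySem.Chars.isalpha, hm] at h

theorem pv_strip_aux : ∀ (l : List Char) (acc : String),
    (l.foldl (fun a c => if PySem.Chars.isalpha c = true then a ++ String.ofList [c] else a) acc).toList
      = acc.toList ++ l.filter PySem.Chars.isalpha := by
  intro l
  induction l with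
  | nil => intro acc; simp
  | cons c t ih =>
    intro acc
    simp only [List.foldl_cons, List.filter_cons]
    by_cases h : PySem.Chars.isalpha c = true
    · rw [if_pos h, if_pos h, ih]
      simp
    · rw [Bool.not_eq_true] at h
      rw [h]
      simp only [Bool.false_eq_true, if_false]
      rw [ih]

theorem pv_strip_eq_filter (s : String) :
    pv_strip s = String.ofList (s.toList.filter PySem.Chars.isalpha) := by
  apply String.toList_inj.mp
  rw [pv_strip]
  simp only [pv_isIn_ascii]
  rw [pv_strip_aux, String.toList_ofList]
  simp

def pvSeg (seg : List Char) : List Char :=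
  (match seg with
   | c :: rest => if PySem.Chars.islower c then PySem.Chars.upperChar c :: rest else c :: rest
   | [] => ([] : List Char)).filter PySem.Chars.isalpha

def pvMatch : List (List Char) → List Char
  | s :: r => s.filter PySem.Chars.isalpha ++ (r.map pvSeg).flatten
  | [] => []

theorem pvSplitc_cons_ne (c : Char) (t : List Char) (hc : c ≠ '/') (s : List Char)
    (r : List (List Char)) (hs : pvSplitc t = s :: r) : pvSplitc (c :: t) = (c :: s) :: r := by
  rw [pvSplitc, if_neg hc, hs]

theorem pvSplitc_cons_slash (t : List Char) : pvSplitc ('/' :: t) = [] :: pvSplitc t := by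
  rw [pvSplitc, if_pos rfl]

theorem pv_isalpha_upperChar (c : Char) (h : PySem.Chars.islower c = true) :
    PySem.Chars.isalpha (PySem.Chars.upperChar c) = true := by
  have ht := pv_toNat_upperChar c h
  rw [pv_islower_iff] at h
  rw [PySem.Chars.isalpha, Bool.or_eq_true, pv_isupper_iff]
  exact Or.inl (by omega)

theorem pv_isalpha_slash : PySem.Chars.isalpha '/' = false := by decide

theorem pv_main_aux : ∀ (n : Nat) (l : List Char), l.length ≤ n →
    ((pvCap l).filter PySem.Chars.isalpha = pvMatch (pvSplitc l)) ∧
    ((pvCap ('/' :: l)).filter PySem.Chars.isalpha = ((pvSplitc l).map pvSeg).flatten) := by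
  intro n
  induction n with
  | zero =>
    intro l h
    have : l = [] := by cases l <;> simp_all
    subst this
    constructor <;> decide
  | succ n ih =>
    intro l hlen
    have h2 : (pvCap l).filter PySem.Chars.isalpha = pvMatch (pvSplitc l) := by
      match l with
      | [] => decide
      | c :: t =>
        by_cases hc : c = '/'
        · subst hc
          rw [pvSplitc_cons_slash, pvMatch]
          simp only [List.filter_nil, List.nil_append]
          exact (ih t (by simp at hlen; omega)).2
        · obtain ⟨s, r, hs⟩ : ∃ s r, pvSplitc t = s :: r := by
            cases hq : pvSplitc t with
            | nil => exact absurd hq (pvSplitc_ne_nil t)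
            | cons s r => exact ⟨s, r, rfl⟩
          rw [pvCap_cons_ne c t hc, pvSplitc_cons_ne c t hc s r hs, pvMatch]
          rw [List.filter_cons, List.filter_cons]
          have ht2 := (ih t (by simp at hlen; omega)).1
          rw [hs, pvMatch] at ht2
          rw [ht2]
          split_ifs <;> simp
    refine ⟨h2, ?_⟩
    match l with
    | [] => decide
    | y :: t =>
      by_cases hy : PySem.Chars.islower y = true
      · have hy' : y ≠ '/' := pv_islower_ne_slash y hy
        obtain ⟨s, r, hs⟩ : ∃ s r, pvSplitc t = s :: r := by
          cases hq : pvSplitc t with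
          | nil => exact absurd hq (pvSplitc_ne_nil t)
          | cons s r => exact ⟨s, r, rfl⟩
        have hcap : pvCap ('/' :: y :: t) = PySem.Chars.upperChar y :: pvCap t := by
          rw [pvCap, if_pos ⟨rfl, hy⟩]
        rw [hcap, pvSplitc_cons_ne y t hy' s r hs]
        rw [List.filter_cons, if_pos (pv_isalpha_upperChar y hy)]
        simp only [List.map_cons, List.flatten_cons]
        have hseg : pvSeg (y :: s) = PySem.Chars.upperChar y :: s.filter PySem.Chars.isalpha := by
          rw [pvSeg]
          simp only [hy, if_true]
          rw [List.filter_cons, if_pos (pv_isalpha_upperChar y hy)]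
        rw [hseg]
        have ht2 := (ih t (by simp at hlen; omega)).1
        rw [hs, pvMatch] at ht2
        rw [ht2]
        simp
      · have hcap : pvCap ('/' :: y :: t) = '/' :: pvCap (y :: t) := by
          rw [pvCap, if_neg (by simp [hy])]
        rw [hcap, List.filter_cons]
        simp only [pv_isalpha_slash, Bool.false_eq_true, if_false]
        rw [h2]
        by_cases hc : y = '/'
        · subst hc
          rw [pvSplitc_cons_slash, pvMatch]
          simp [pvSeg]
        · obtain ⟨s, r, hs⟩ : ∃ s r, pvSplitc t = s :: r := by
            cases hq : pvSplitc t with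
            | nil => exact absurd hq (pvSplitc_ne_nil t)
            | cons s r => exact ⟨s, r, rfl⟩
          rw [pvSplitc_cons_ne y t hc s r hs, pvMatch]
          simp only [List.map_cons, List.flatten_cons]
          have hseg : pvSeg (y :: s) = (y :: s).filter PySem.Chars.isalpha := by
            rw [pvSeg]
            rw [Bool.not_eq_true] at hy
            simp only [hy, Bool.false_eq_true, if_false]
          rw [hseg]

theorem pv_main (l : List Char) :
    (pvCap ('/' :: l)).filter PySem.Chars.isalpha = ((pvSplitc l).map pvSeg).flatten :=
  (pv_main_aux l.length l (le_refl _)).2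


theorem pvCap_ne_nil (l : List Char) (h : l ≠ []) : pvCap l ≠ [] := by
  match l with
  | [x] => simp [pvCap]
  | x :: y :: t =>
    rw [pvCap]
    split <;> simp

theorem pv_suffix_singleton (M : List Char) (b x : Char) : [x] <:+ (M ++ [b]) ↔ b = x := by
  constructor
  · rintro ⟨pre, hp⟩
    have hlen : pre.length = M.length := by
      have := congrArg List.length hp
      simp at this
      omega
    have h2 := List.append_inj_right hp hlen
    simp at h2
    exact h2.symm
  · rintro rfl
    exact ⟨M, rfl⟩

theorem pv_foldA : ∀ (L : List Char) (s : String),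
    (L.foldl (fun p c => PySem.Str.replace p (String.ofList ['/', c]) (PySem.Str.upper (String.ofList [c]))) s).toList
      = L.foldl pvStep s.toList := by
  intro L
  induction L with
  | nil => intro s; rfl
  | cons c L ih =>
    intro s
    simp only [List.foldl_cons]
    rw [ih]
    congr 1
    rw [PySem.Str.toList_replace, String.toList_ofList, PySem.Str.toList_upper, String.toList_ofList]
    show PySem.Chars.replace s.toList ['/', c] (PySem.Chars.upper [c]) = pvStep s.toList c
    rw [show PySem.Chars.upper [c] = [PySem.Chars.upperChar c] from rfl]
    exact pv_replace_eq_repc c s.toList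

theorem pvA_fold (s : String) :
    ("abcdefghijklmnopqrstuvwxyz".toList.foldl
      (fun p c => PySem.Str.replace p (String.ofList ['/', c]) (PySem.Str.upper (String.ofList [c]))) s).toList
      = pvCap s.toList := by
  rw [show "abcdefghijklmnopqrstuvwxyz".toList = pvLetters from rfl, pv_foldA, pv_fold_eq_cap]

/-- the common value both programs compute in the non-root case -/
def pvResult (q : List Char) : String :=
  String.ofList (((pvSplitc q).map pvSeg).flatten ++ "Resource".toList)

theorem pvA_tail_eq (p2 : String) (hne : p2.toList ≠ []) :
    (let p3 := if p2 = "" ∨ PySem.Str.pyGet? p2 0 = some '/' then p2 else "/" ++ p2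
     let p4 := "abcdefghijklmnopqrstuvwxyz".toList.foldl
        (fun p c => PySem.Str.replace p (String.ofList ['/', c]) (PySem.Str.upper (String.ofList [c]))) p3
     if p4 = "" then "rootResource" else pv_strip p4 ++ "Resource") = pvResult p2.toList := by
  have hp2 : p2 ≠ "" := fun he => hne (by rw [he]; rfl)
  cases hL : p2.toList with
  | nil => exact absurd hL hne
  | cons qh qt =>
    by_cases hq : qh = '/'
    · have hcond : p2 = "" ∨ PySem.Str.pyGet? p2 0 = some '/' := by
        right
        rw [PySem.Str.pyGet?_eq, PySem.Chars.pyGet?_eq_listPyGet?, hL, PySem.List.pyGet?_zero_cons, hq]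
      simp only [if_pos hcond]
      have h4 : ("abcdefghijklmnopqrstuvwxyz".toList.foldl
          (fun p c => PySem.Str.replace p (String.ofList ['/', c]) (PySem.Str.upper (String.ofList [c]))) p2).toList
          = pvCap p2.toList := pvA_fold p2
      rw [hL, hq] at h4
      have hne4 : ¬ ("abcdefghijklmnopqrstuvwxyz".toList.foldl
          (fun p c => PySem.Str.replace p (String.ofList ['/', c]) (PySem.Str.upper (String.ofList [c]))) p2) = "" := by
        intro he
        have := congrArg String.toList he
        rw [h4] at this
        exact pvCap_ne_nil _ (by simp) this
      rw [if_neg hne4]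
      apply String.toList_inj.mp
      rw [String.toList_append, pv_strip_eq_filter, String.toList_ofList, h4]
      rw [pv_main qt]
      simp [pvResult, pvSeg, hq, pvSplitc_cons_slash]
    · have hcond : ¬ (p2 = "" ∨ PySem.Str.pyGet? p2 0 = some '/') := by
        rintro (he | he)
        · exact hp2 he
        · rw [PySem.Str.pyGet?_eq, PySem.Chars.pyGet?_eq_listPyGet?, hL, PySem.List.pyGet?_zero_cons] at he
          exact hq (Option.some_inj.mp he)
      simp only [if_neg hcond]
      have h3 : ("/" ++ p2).toList = '/' :: p2.toList := by
        rw [String.toList_append]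
        rfl
      have h4 : ("abcdefghijklmnopqrstuvwxyz".toList.foldl
          (fun p c => PySem.Str.replace p (String.ofList ['/', c]) (PySem.Str.upper (String.ofList [c]))) ("/" ++ p2)).toList
          = pvCap ('/' :: p2.toList) := by
        rw [pvA_fold, h3]
      have hne4 : ¬ ("abcdefghijklmnopqrstuvwxyz".toList.foldl
          (fun p c => PySem.Str.replace p (String.ofList ['/', c]) (PySem.Str.upper (String.ofList [c]))) ("/" ++ p2)) = "" := by
        intro he
        have := congrArg String.toList he
        rw [h4] at this
        exact pvCap_ne_nil _ (by simp) this
      rw [if_neg hne4]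
      apply String.toList_inj.mp
      rw [String.toList_append, pv_strip_eq_filter, String.toList_ofList, h4]
      rw [pv_main p2.toList]
      simp [pvResult, hL]

-- ===== VERDICT (by name: the statement is the Claim_ definition above) =====
theorem canonical_resource_name_spec : Claim_equal_canonical_resource_name := by
  intro path _
  unfold Spec_canonical_resource_name canonical_resource_name canonical_resource_name_alt
  by_cases h0 : path = ""
  · subst h0
    decide
  · simp only [if_neg h0]
    by_cases h1 : PySem.Str.lower path = "/"
    · rw [h1]
      decide
    · rw [if_neg h1]
      have hLne : (PySem.Str.lower path).toList ≠ [] := by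
        intro he
        apply h0
        rw [PySem.Str.toList_lower] at he
        have : path.toList = [] := by
          rcases hx : path.toList with _ | ⟨c, t⟩
          · rfl
          · rw [hx] at he; simp [PySem.Chars.lower] at he
        exact String.toList_eq_nil_iff.mp this
      obtain ⟨M, a, hMa⟩ : ∃ M a, (PySem.Str.lower path).toList = M ++ [a] := by
        rcases (PySem.Str.lower path).toList.eq_nil_or_concat with he | ⟨M, a, he⟩
        · exact absurd he hLne
        · exact ⟨M, a, by simpa using he⟩
      by_cases ha : a = '/'
      · -- trailing slash removed on both sides
        have hget : PySem.Str.pyGet? (PySem.Str.lower path) (-1) = some '/' := by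
          rw [PySem.Str.pyGet?_eq, PySem.Chars.pyGet?_eq_listPyGet?, hMa, ha]
          exact PySem.List.pyGet?_neg_one_append_singleton M '/'
        have hends : PySem.Str.endswith (PySem.Str.lower path) "/" = true := by
          rw [PySem.Str.endswith_eq, PySem.Chars.endswith_iff]
          rw [hMa]
          exact (pv_suffix_singleton M a '/').mpr ha
        rw [if_pos hget, if_pos hends]
        have hsl : (PySem.Str.slice (PySem.Str.lower path) none (some (-1))).toList = M := by
          rw [PySem.Str.slice_to_neg_one, hMa]
          simp
        have hMne : M ≠ [] := by
          intro he
          apply h1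
          apply String.toList_inj.mp
          rw [hMa, he, ha]
          rfl
        rw [pvA_tail_eq _ (by rw [hsl]; exact hMne)]
        rw [pv_splitOn_eq_splitc, hsl]
        rfl
      · have hget : ¬ PySem.Str.pyGet? (PySem.Str.lower path) (-1) = some '/' := by
          rw [PySem.Str.pyGet?_eq, PySem.Chars.pyGet?_eq_listPyGet?, hMa]
          rw [PySem.List.pyGet?_neg_one_append_singleton M a]
          exact fun he => ha (Option.some_inj.mp he)
        have hends : PySem.Str.endswith (PySem.Str.lower path) "/" = false := by
          rw [PySem.Str.endswith_eq]
          rw [Bool.eq_false_iff]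
          intro hc
          rw [PySem.Chars.endswith_iff] at hc
          rw [show ("/" : String).toList = ['/'] from rfl, hMa] at hc
          exact ha ((pv_suffix_singleton M a '/').mp hc)
        rw [if_neg hget, hends]
        simp only [Bool.false_eq_true, if_false]
        rw [pvA_tail_eq _ hLne]
        rw [pv_splitOn_eq_splitc]
        rfl
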